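-- pv_equiv track=rewrite | github.com/vittorioapi91/TradingPythonAgent | src/trading_agent/fundamentals/edgar.py | _identify_amendment_relationships
-- ===== SOURCE A (Python) =====
-- from typing import List, Dict, Optional, Set
--
-- def _identify_amendment_relationships(filings: List[Dict]) -> List[Dict]:
--     """
--     Identify which filing each amendment amends and add 'amends_accession' field
--
--     Args:
--         filings: List of filing dictionaries
--
--     Returns:
--         List of filing dictionaries with 'amends_accession' field added for amendments
--     """
--     # Sort filings by date (oldest first) to process in chronological order
--     sorted_filings = sorted(filings, key=lambda x: x.get('filing_date', ''))
--
--     # Group filings by base form type (e.g., '10-K', '10-Q', '8-K')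
--     filings_by_base_type = {}
--     for filing in sorted_filings:
--         filing_type = filing.get('filing_type', '')
--         if not filing_type:
--             continue
--
--         base_type = filing_type.split('/')[0]
--         if base_type not in filings_by_base_type:
--             filings_by_base_type[base_type] = []
--         filings_by_base_type[base_type].append(filing)
--
--     # For each base type, identify amendment relationships
--     for base_type, type_filings in filings_by_base_type.items():
--         # Separate originals and amendments
--         originals = [f for f in type_filings if '/' not in f.get('filing_type', '')]
--         amendments = [f for f in type_filings if '/' in f.get('filing_type', '')]
--
--         # For each amendment, find the original it amends
--         for amendment in amendments:
--             amendment_date = amendment.get('filing_date', '')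
--             if not amendment_date:
--                 continue
--
--             # Find the most recent original filing of the same type filed before this amendment
--             # Match by: same base type, filed before amendment, closest date
--             matching_originals = [
--                 orig for orig in originals
--                 if orig.get('filing_date', '') < amendment_date
--             ]
--
--             if matching_originals:
--                 # Sort by date descending to get most recent
--                 matching_originals.sort(key=lambda x: x.get('filing_date', ''), reverse=True)
--                 amended_filing = matching_originals[0]
--                 amendment['amends_accession'] = amended_filing.get('accession_number', '')
--                 amendment['amends_filing_date'] = amended_filing.get('filing_date', '')
--             else:
--                 # No matching original found (shouldn't happen, but handle gracefully)
--                 amendment['amends_accession'] = None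
--                 amendment['amends_filing_date'] = None
--
--     return sorted_filings
-- ===== SOURCE B (Python) =====
-- from typing import List, Dict
--
-- def _identify_amendment_relationships(filings: List[Dict]) -> List[Dict]:
--     """Single chronological pass: after sorting once, keep per base type the first
--     original of the two most recent distinct filing-date groups; an amendment's
--     match is read off that state.  (Mutates the filing dicts in place, like the
--     original.)"""
--     sorted_filings = sorted(filings, key=lambda x: x.get('filing_date', ''))
--     # base_type -> (prev, cur): first original of the second-latest / latest
--     # distinct date group among the originals seen so far
--     state = {}
--     for f in sorted_filings:
--         ft = f.get('filing_type', '')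
--         if not ft:
--             continue
--         base = ft.split('/')[0]
--         prev, cur = state.get(base, (None, None))
--         if '/' in ft:
--             d = f.get('filing_date', '')
--             if not d:
--                 continue
--             match = None
--             if cur is not None:
--                 match = cur if cur.get('filing_date', '') < d else prev
--             if match is not None:
--                 f['amends_accession'] = match.get('accession_number', '')
--                 f['amends_filing_date'] = match.get('filing_date', '')
--             else:
--                 f['amends_accession'] = None
--                 f['amends_filing_date'] = None
--         else:
--             if cur is None:
--                 state[base] = (None, f)
--             elif cur.get('filing_date', '') < f.get('filing_date', ''):
--                 state[base] = (cur, f)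
--     return sorted_filings
-- ===== Notes on version B (the rewrite author's own statement) =====
-- stated objective: alternative
-- what changed: Instead of, for every amendment, filtering all originals of its group and sorting them by date (descending) to pick the most recent prior original, B makes one chronological pass after the initial sort, keeping per base type only the first original of the two most recent distinct filing-date groups and answering each amendment from that O(1) state.
import Mathlib
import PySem

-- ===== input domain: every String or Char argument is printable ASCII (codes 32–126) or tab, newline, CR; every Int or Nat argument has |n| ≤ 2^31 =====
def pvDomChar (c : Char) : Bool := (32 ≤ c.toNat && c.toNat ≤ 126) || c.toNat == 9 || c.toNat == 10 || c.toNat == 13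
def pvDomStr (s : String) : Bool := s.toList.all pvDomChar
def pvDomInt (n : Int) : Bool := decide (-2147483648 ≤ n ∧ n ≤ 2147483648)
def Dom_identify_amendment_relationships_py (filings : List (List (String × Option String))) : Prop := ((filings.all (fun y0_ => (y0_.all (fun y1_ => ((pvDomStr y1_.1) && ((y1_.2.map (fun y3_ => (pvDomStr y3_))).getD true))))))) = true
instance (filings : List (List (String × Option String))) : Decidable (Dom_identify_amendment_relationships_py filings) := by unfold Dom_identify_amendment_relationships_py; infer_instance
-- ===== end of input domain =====

-- B replaces A's per-amendment scan+sort over all originals of the group by one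
-- chronological pass that keeps, per base type, the first original of the two most
-- recent distinct date groups (objective: alternative algorithm).  Python A mutates
-- the filing dicts in place and so does Python B; the theorems below are about the
-- return value.

-- ===== PORT A =====

-- f.get(k, '') read as a string: '' for a missing key and also for a None value
-- (exact on every path A reaches under Pre_: date values are never None there, and
-- a None filing_type is only ever truthiness-tested, where it acts like '')
def pvGetS (f : List (String × Option String)) (k : String) : String :=
  match (PySem.Dict.mk f).get? k with
  | some (some s) => s
  | some none => ""
  | none => ""

-- f.get(k, '') kept as the raw Python value (None stays None)
def pvGetV (f : List (String × Option String)) (k : String) : Option String :=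
  ((PySem.Dict.mk f).get? k).getD (some "")

-- filing_type.split('/')[0]; split? of a nonempty separator is always some, and the
-- split list is always nonempty, so the defaults are never used
def pvBase (ft : String) : String := (((PySem.Str.split? ft "/").getD []).headD "")

def identify_amendment_relationships_py (filings : List (List (String × Option String))) : List (List (String × Option String)) :=
  let sorted_filings := PySem.List.sorted filings (fun x => pvGetS x "filing_date")
  -- Python mutates dict objects aliased between sorted_filings and the groups; the
  -- position in sorted_filings stands for the object's identity, so the groups hold
  -- (index, filing) pairs and the in-place updates are collected per index and
  -- applied at the end (exact: A returns sorted_filings with exactly these dicts updated)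
  let groups : PySem.Dict String (List (Int × List (String × Option String))) :=
    (PySem.List.enumerate sorted_filings).foldl (fun g p =>
      let filing_type := pvGetS p.2 "filing_type"
      if filing_type = "" then g
      else g.modify (pvBase filing_type) [] (· ++ [p])) PySem.Dict.empty
  let updates : PySem.Dict Int (Option String × Option String) :=
    groups.items.foldl (fun u bt =>
      let originals := bt.2.filter (fun q => !(PySem.Str.isIn "/" (pvGetS q.2 "filing_type")))
      let amendments := bt.2.filter (fun q => PySem.Str.isIn "/" (pvGetS q.2 "filing_type"))
      amendments.foldl (fun u q =>
        let amendment_date := pvGetS q.2 "filing_date"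
        if amendment_date = "" then u
        else
          let matching_originals := originals.filter (fun o => pvGetS o.2 "filing_date" < amendment_date)
          match (PySem.List.sorted matching_originals (fun o => pvGetS o.2 "filing_date") true).head? with
          | some am => u.insert q.1 (pvGetV am.2 "accession_number", pvGetV am.2 "filing_date")
          | none => u.insert q.1 (none, none)) u) PySem.Dict.empty
  (PySem.List.enumerate sorted_filings).map (fun p =>
    match updates.get? p.1 with
    | some w => (((PySem.Dict.mk p.2).insert "amends_accession" w.1).insert "amends_filing_date" w.2).items
    | none => p.2)

-- ===== PORT B =====

-- amendment['amends_accession'] = w.1; amendment['amends_filing_date'] = w.2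
def pvSetAmends (f : List (String × Option String)) (w : Option String × Option String) : List (String × Option String) :=
  (((PySem.Dict.mk f).insert "amends_accession" w.1).insert "amends_filing_date" w.2).items

-- the single chronological pass of Source B; state maps a base type to (prev, cur), the
-- first original of the second-latest / latest distinct date group seen so far
def pvLoopB (state : PySem.Dict String (Option (List (String × Option String)) × Option (List (String × Option String)))) :
    List (List (String × Option String)) → List (List (String × Option String))
  | [] => []
  | f :: rest =>
    let ft := pvGetS f "filing_type"
    if ft = "" then f :: pvLoopB state rest
    else
      let pc := state.getD (pvBase ft) (none, none)
      if PySem.Str.isIn "/" ft then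
        let d := pvGetS f "filing_date"
        if d = "" then f :: pvLoopB state rest
        else
          let m : Option (List (String × Option String)) :=
            match pc.2 with
            | none => none
            | some c => if pvGetS c "filing_date" < d then some c else pc.1
          (match m with
           | some mm => pvSetAmends f (pvGetV mm "accession_number", pvGetV mm "filing_date")
           | none => pvSetAmends f (none, none)) :: pvLoopB state rest
      else
        let state' :=
          match pc.2 with
          | none => state.insert (pvBase ft) (none, some f)
          | some c => if pvGetS c "filing_date" < pvGetS f "filing_date"
                      then state.insert (pvBase ft) (some c, some f) else state
        f :: pvLoopB state' rest

def identify_amendment_relationships_py_alt (filings : List (List (String × Option String))) : List (List (String × Option String)) :=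
  pvLoopB PySem.Dict.empty (PySem.List.sorted filings (fun x => pvGetS x "filing_date"))

-- ===== PRECONDITION & SPEC =====

-- Pre_ excludes only the inputs on which A raises: with two or more filings, a
-- 'filing_date' key holding None makes Python's sort comparison raise TypeError
-- (with at most one filing no comparison happens and A returns normally).
def Pre_identify_amendment_relationships_py (filings : List (List (String × Option String))) : Prop :=
  filings.length ≤ 1 ∨ ∀ f ∈ filings, (PySem.Dict.mk f).get? "filing_date" ≠ some none

instance (filings : List (List (String × Option String))) : Decidable (Pre_identify_amendment_relationships_py filings) := by
  unfold Pre_identify_amendment_relationships_py; infer_instance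

def pvWitness_identify_amendment_relationships_py : (List (List (String × Option String))) :=
  [[("filing_type", some "10-K"), ("filing_date", some "2020-01-01"), ("accession_number", some "a1")],
   [("filing_type", some "10-K/A"), ("filing_date", some "2020-02-01")]]

def Spec_identify_amendment_relationships_py (filings : List (List (String × Option String))) (out : List (List (String × Option String))) : Prop := out = identify_amendment_relationships_py_alt filings
instance (filings : List (List (String × Option String))) (out : List (List (String × Option String))) : Decidable (Spec_identify_amendment_relationships_py filings out) := by unfold Spec_identify_amendment_relationships_py; infer_instance

-- ===== CLAIM (what is proved, stated in full; the proofs are below) =====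
def Claim_equal_identify_amendment_relationships_py : Prop := ∀ (filings : List (List (String × Option String))), Dom_identify_amendment_relationships_py filings → Pre_identify_amendment_relationships_py filings → Spec_identify_amendment_relationships_py filings (identify_amendment_relationships_py filings)

-- ===== LEMMAS AND PROOFS =====

-- ===== proof-side helpers =====

-- abbreviations for the fields both programs read
def pvDate (f : List (String × Option String)) : String := pvGetS f "filing_date"
def pvTyp (f : List (String × Option String)) : String := pvGetS f "filing_type"
def pvAmd (f : List (String × Option String)) : Bool := PySem.Str.isIn "/" (pvTyp f)
def pvInG (b : String) (f : List (String × Option String)) : Bool :=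
  (!(decide (pvTyp f = ""))) && (pvBase (pvTyp f) == b)
def pvOrig (b : String) (l : List (List (String × Option String))) : List (List (String × Option String)) :=
  l.filter (fun f => pvInG b f && !pvAmd f)

-- B's state step on an original, and the state after a prefix
def pvStep0 (pc : Option (List (String × Option String)) × Option (List (String × Option String)))
    (f : List (String × Option String)) :
    Option (List (String × Option String)) × Option (List (String × Option String)) :=
  match pc.2 with
  | none => (none, some f)
  | some c => if pvDate c < pvDate f then (some c, some f) else pc
def pvSt (b : String) (l : List (List (String × Option String))) :
    Option (List (String × Option String)) × Option (List (String × Option String)) :=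
  (pvOrig b l).foldl pvStep0 (none, none)

-- first element with maximal key (what the head of a stable reverse sort is)
def pvG {α : Type} (key : α → String) (m : Option α) (x : α) : Option α :=
  match m with
  | none => some x
  | some y => if key y < key x then some x else some y
def pvFam {α : Type} (key : α → String) (l : List α) : Option α := l.foldl (pvG key) none

-- B's match, read off the state
def pvBM (pc : Option (List (String × Option String)) × Option (List (String × Option String)))
    (d : String) : Option (List (String × Option String)) :=
  match pc.2 with
  | none => none
  | some c => if pvDate c < d then some c else pc.1

-- the update an amendment receives, as a function of the originals before it
def pvAns (pre : List (List (String × Option String))) (f : List (String × Option String)) :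
    Option (Option String × Option String) :=
  if pvTyp f = "" then none
  else if pvAmd f then
    (if pvDate f = "" then none
     else some (match pvBM (pvSt (pvBase (pvTyp f)) pre) (pvDate f) with
                | some m => (pvGetV m "accession_number", pvGetV m "filing_date")
                | none => (none, none)))
  else none

def pvApply (f : List (String × Option String)) :
    Option (Option String × Option String) → List (String × Option String)
  | some w => (((PySem.Dict.mk f).insert "amends_accession" w.1).insert "amends_filing_date" w.2).items
  | none => f

def pvSpecList (pre l : List (List (String × Option String))) : List (List (String × Option String)) :=
  match l with
  | [] => []
  | f :: r => pvApply f (pvAns pre f) :: pvSpecList (pre ++ [f]) r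

-- ===== B side =====

theorem pvOrig_append_singleton (b : String) (l : List (List (String × Option String))) (f) :
    pvOrig b (l ++ [f]) = pvOrig b l ++ (if pvInG b f && !pvAmd f then [f] else []) := by
  simp [pvOrig, List.filter_append]; split <;> simp_all



-- ===== reverse-sort head = first max =====



-- ===== the crux: state answer = filter+first-max answer (on a sorted prefix) =====


theorem pvHead_insertBy {α : Type} (key : α → String) (x : α) (acc : List α) :
    (PySem.List.insertBy (fun a b => decide (key b < key a)) x acc).head? = pvG key acc.head? x := by
  cases acc with
  | nil => simp [PySem.List.insertBy, pvG]
  | cons y ys =>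
    simp only [PySem.List.insertBy, pvG, List.head?_cons]
    by_cases h : key y < key x <;> simp [h]

theorem pvHead_sorted_rev {α : Type} (key : α → String) (l : List α) :
    (PySem.List.sorted l key true).head? = pvFam key l := by
  rw [PySem.List.sorted_rev_eq_foldl_insertBy]
  show _ = l.foldl (pvG key) none
  rw [show (none : Option α) = ([] : List α).head? from rfl]
  generalize ([] : List α) = acc
  induction l generalizing acc with
  | nil => rfl
  | cons x xs ih => simp only [List.foldl_cons]; rw [ih, pvHead_insertBy]

theorem pvFam_append_singleton {α : Type} (key : α → String) (l : List α) (x : α) :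
    pvFam key (l ++ [x]) = pvG key (pvFam key l) x := by
  simp [pvFam, List.foldl_append]

theorem pvFoldl_pvG_some {α : Type} (key : α → String) (l : List α) (y : α) :
    ∃ z, l.foldl (pvG key) (some y) = some z := by
  induction l generalizing y with
  | nil => exact ⟨y, rfl⟩
  | cons x xs ih =>
    simp only [List.foldl_cons, pvG]
    by_cases h : key y < key x <;> simp [h] <;> apply ih

theorem pvFam_eq_none_iff {α : Type} (key : α → String) (l : List α) :
    pvFam key l = none ↔ l = [] := by
  cases l with
  | nil => simp [pvFam]
  | cons a as =>
    simp only [pvFam, List.foldl_cons]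
    have : pvG key none a = some a := rfl
    rw [this]
    obtain ⟨z, hz⟩ := pvFoldl_pvG_some key as a
    simp [hz]

theorem pvStInv (os : List (List (String × Option String)))
    (hs : os.Pairwise (fun a b => pvDate a ≤ pvDate b)) :
    (os.foldl pvStep0 (none, none)).2 = pvFam pvDate os ∧
    (∀ c, (os.foldl pvStep0 (none, none)).2 = some c →
      c ∈ os ∧ (∀ o ∈ os, pvDate o ≤ pvDate c) ∧
      (os.foldl pvStep0 (none, none)).1 = pvFam pvDate (os.filter (fun o => pvDate o < pvDate c))) := by
  induction os using List.reverseRecOn with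
  | nil => simp [pvFam]
  | append_singleton os o ih =>
    have hpair : os.Pairwise (fun a b => pvDate a ≤ pvDate b) := hs.sublist (by simp)
    have hlast : ∀ x ∈ os, pvDate x ≤ pvDate o := by
      intro x hx
      exact (List.pairwise_append.1 hs).2.2 x hx o (by simp)
    obtain ⟨ih1, ih2⟩ := ih hpair
    rw [List.foldl_append]
    simp only [List.foldl_cons, List.foldl_nil]
    rw [pvFam_append_singleton]
    cases hcur : (os.foldl pvStep0 (none, none)).2 with
    | none =>
      have hos : os = [] := by
        rw [ih1] at hcur
        exact (pvFam_eq_none_iff _ _).1 hcur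
      subst hos
      simp only [List.foldl_nil] at hcur ⊢
      refine ⟨by simp [pvStep0, pvFam, pvG], ?_⟩
      rintro c' hc'
      simp only [pvStep0] at hc'
      injection hc' with hc'; subst hc'
      simp [pvStep0, pvFam]
    | some c =>
      obtain ⟨hmem, hmax, hprev⟩ := ih2 c hcur
      have hfam : pvFam pvDate os = some c := by rw [← ih1]; exact hcur
      simp only [pvStep0, hcur]
      by_cases hlt : pvDate c < pvDate o
      · simp only [if_pos hlt]
        constructor
        · rw [hfam]; simp only [pvG]; rw [if_pos hlt]
        · rintro c' hc'
          injection hc' with h; subst h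
          refine ⟨by simp, ?_, ?_⟩
          · intro x hx
            rcases List.mem_append.1 hx with h | h
            · exact le_of_lt (lt_of_le_of_lt (hmax x h) hlt)
            · simp at h; subst h; exact le_refl _
          · rw [List.filter_append]
            have hself : os.filter (fun x => pvDate x < pvDate o) = os :=
              List.filter_eq_self.2 (fun x hx => decide_eq_true (lt_of_le_of_lt (hmax x hx) hlt))
            have hone : List.filter (fun x => decide (pvDate x < pvDate o)) [o] = [] := by
              have h1 : ¬ pvDate o < pvDate o := lt_irrefl _
              simp only [List.filter, decide_eq_false h1]
            rw [hself, hone, List.append_nil, hfam]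
      · simp only [if_neg hlt]
        have heq : pvDate o = pvDate c :=
          le_antisymm (le_of_not_gt (by simpa using hlt)) (hlast c hmem)
        constructor
        · rw [hcur, hfam]; simp only [pvG]; rw [if_neg hlt]
        · rintro c' hc'
          rw [hcur] at hc'
          injection hc' with h; subst h
          refine ⟨List.mem_append_left _ hmem, ?_, ?_⟩
          · intro x hx
            rcases List.mem_append.1 hx with h | h
            · exact hmax x h
            · simp at h; subst h; exact le_of_eq heq
          · rw [List.filter_append]
            have hone : List.filter (fun x => decide (pvDate x < pvDate c)) [o] = [] := by
              have h1 : ¬ pvDate o < pvDate c := by rw [heq]; exact lt_irrefl _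
              simp only [List.filter, decide_eq_false h1]
            rw [hone, List.append_nil]
            exact hprev

theorem pvCrux (os : List (List (String × Option String))) (d : String)
    (hs : os.Pairwise (fun a b => pvDate a ≤ pvDate b))
    (hle : ∀ o ∈ os, pvDate o ≤ d) :
    pvFam pvDate (os.filter (fun o => pvDate o < d)) = pvBM (os.foldl pvStep0 (none, none)) d := by
  obtain ⟨h1, h2⟩ := pvStInv os hs
  cases hcur : (os.foldl pvStep0 (none, none)).2 with
  | none =>
    have hos : os = [] := by rw [h1] at hcur; exact (pvFam_eq_none_iff _ _).1 hcur
    subst hos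
    simp [pvBM, pvFam]
  | some c =>
    obtain ⟨hmem, hmax, hprev⟩ := h2 c hcur
    simp only [pvBM, hcur]
    by_cases hlt : pvDate c < d
    · simp only [if_pos hlt]
      have hself : os.filter (fun o => pvDate o < d) = os := by
        apply List.filter_eq_self.2
        intro x hx; exact decide_eq_true (lt_of_le_of_lt (hmax x hx) hlt)
      rw [hself, ← h1, hcur]
    · simp only [if_neg hlt]
      have heq : d = pvDate c := le_antisymm (le_of_not_gt (by simpa using hlt)) (hle c hmem)
      rw [heq, hprev]

theorem pvDate_eq (g : List (String × Option String)) : pvGetS g "filing_date" = pvDate g := rfl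
theorem pvTyp_eq (g : List (String × Option String)) : pvGetS g "filing_type" = pvTyp g := rfl
theorem pvAmd_eq (g : List (String × Option String)) : PySem.Str.isIn "/" (pvTyp g) = pvAmd g := rfl

theorem pvSt_append (b : String) (pre : List (List (String × Option String))) (f) :
    pvSt b (pre ++ [f])
      = if pvInG b f && !pvAmd f then pvStep0 (pvSt b pre) f else pvSt b pre := by
  rw [pvSt, pvOrig_append_singleton]
  split
  · rw [List.foldl_append]; rfl
  · rw [List.append_nil]; rfl

theorem pvLoopB_eq_specList :
    ∀ (l pre : List (List (String × Option String)))
      (state : PySem.Dict String (Option (List (String × Option String)) × Option (List (String × Option String)))),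
      (∀ b, state.getD b (none, none) = pvSt b pre) →
      pvLoopB state l = pvSpecList pre l := by
  intro l
  induction l with
  | nil => intro pre state h; rfl
  | cons f r ih =>
    intro pre state h
    simp only [pvLoopB, pvSpecList, pvTyp_eq, pvAmd_eq, pvDate_eq]
    by_cases h1 : pvTyp f = ""
    · rw [if_pos h1, pvAns, if_pos h1]
      refine congrArg₂ _ rfl (ih _ state ?_)
      intro b; rw [h b, pvSt_append]
      have hb : pvInG b f = false := by simp [pvInG, h1]
      simp [hb]
    · rw [if_neg h1]
      by_cases h2 : pvAmd f = true
      · rw [if_pos h2]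
        have hrec : pvLoopB state r = pvSpecList (pre ++ [f]) r := by
          apply ih; intro b; rw [h b, pvSt_append]
          have hb : (pvInG b f && !pvAmd f) = false := by simp [h2]
          simp [hb]
        by_cases h3 : pvDate f = ""
        · rw [if_pos h3, hrec, pvAns, if_neg h1, if_pos h2, if_pos h3, pvApply]
        · rw [if_neg h3, hrec, pvAns, if_neg h1, if_pos h2, if_neg h3, pvApply]
          rw [h (pvBase (pvTyp f))]
          show (match pvBM (pvSt (pvBase (pvTyp f)) pre) (pvDate f) with
                | some mm => pvSetAmends f (pvGetV mm "accession_number", pvGetV mm "filing_date")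
                | none => pvSetAmends f (none, none)) :: _ = _
          cases pvBM (pvSt (pvBase (pvTyp f)) pre) (pvDate f) <;> rfl
      · rw [if_neg h2, pvAns, if_neg h1, if_neg h2]
        refine congrArg₂ _ rfl (ih _ _ ?_)
        intro b; rw [pvSt_append]
        by_cases hb : b = pvBase (pvTyp f)
        · have hin : pvInG b f = true := by simp [pvInG, h1, hb]
          rw [hin, Bool.true_and, show (!pvAmd f) = true by simp [h2], if_pos rfl, ← h b, ← hb]
          cases hc : (state.getD b (none, none)).2 with
          | none =>
            show (state.insert b (none, some f)).getD b (none, none)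
              = pvStep0 (state.getD b (none, none)) f
            rw [PySem.Dict.getD_insert, if_pos rfl]
            simp only [pvStep0, hc]
          | some c =>
            show (if pvDate c < pvDate f then state.insert b (some c, some f) else state).getD b (none, none)
              = pvStep0 (state.getD b (none, none)) f
            simp only [pvStep0, hc]
            by_cases hlt : pvDate c < pvDate f
            · rw [if_pos hlt, if_pos hlt, PySem.Dict.getD_insert, if_pos rfl]
            · rw [if_neg hlt, if_neg hlt]
        · have hin : pvInG b f = false := by
            simp only [pvInG, Bool.and_eq_false_iff]
            right
            simpa [beq_iff_eq] using fun hh => hb hh.symm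
          rw [hin, Bool.false_and, if_neg (by simp), ← h b]
          cases hc : (state.getD (pvBase (pvTyp f)) (none, none)).2 with
          | none =>
            show (state.insert (pvBase (pvTyp f)) (none, some f)).getD b (none, none)
              = state.getD b (none, none)
            rw [PySem.Dict.getD_insert, if_neg hb]
          | some c =>
            show (if pvDate c < pvDate f then state.insert (pvBase (pvTyp f)) (some c, some f) else state).getD b (none, none)
              = state.getD b (none, none)
            by_cases hlt : pvDate c < pvDate f
            · rw [if_pos hlt, PySem.Dict.getD_insert, if_neg hb]
            · rw [if_neg hlt]

theorem pvAlt_eq_specList (filings : List (List (String × Option String))) :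
    identify_amendment_relationships_py_alt filings
      = pvSpecList [] (PySem.List.sorted filings (fun x => pvGetS x "filing_date")) := by
  apply pvLoopB_eq_specList
  intro b
  rfl

-- ===== A side: named pieces of port A (definitionally equal to its lets) =====

def pvGrpStep (g : PySem.Dict String (List (Int × List (String × Option String))))
    (p : Int × List (String × Option String)) :
    PySem.Dict String (List (Int × List (String × Option String))) :=
  let filing_type := pvGetS p.2 "filing_type"
  if filing_type = "" then g
  else g.modify (pvBase filing_type) [] (· ++ [p])

def pvVal (d : String) (originals : List (Int × List (String × Option String))) :
    Option String × Option String :=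
  match (PySem.List.sorted (originals.filter (fun o => pvGetS o.2 "filing_date" < d))
      (fun o => pvGetS o.2 "filing_date") true).head? with
  | some am => (pvGetV am.2 "accession_number", pvGetV am.2 "filing_date")
  | none => (none, none)

def pvInnerStep (originals : List (Int × List (String × Option String)))
    (u : PySem.Dict Int (Option String × Option String))
    (q : Int × List (String × Option String)) :
    PySem.Dict Int (Option String × Option String) :=
  let amendment_date := pvGetS q.2 "filing_date"
  if amendment_date = "" then u
  else
    let matching_originals := originals.filter (fun o => pvGetS o.2 "filing_date" < amendment_date)
    match (PySem.List.sorted matching_originals (fun o => pvGetS o.2 "filing_date") true).head? with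
    | some am => u.insert q.1 (pvGetV am.2 "accession_number", pvGetV am.2 "filing_date")
    | none => u.insert q.1 (none, none)

def pvUpdStep (u : PySem.Dict Int (Option String × Option String))
    (bt : String × List (Int × List (String × Option String))) :
    PySem.Dict Int (Option String × Option String) :=
  let originals := bt.2.filter (fun q => !(PySem.Str.isIn "/" (pvGetS q.2 "filing_type")))
  let amendments := bt.2.filter (fun q => PySem.Str.isIn "/" (pvGetS q.2 "filing_type"))
  amendments.foldl (pvInnerStep originals) u

def pvGroupsOf (sf : List (List (String × Option String))) :
    PySem.Dict String (List (Int × List (String × Option String))) :=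
  (PySem.List.enumerate sf).foldl pvGrpStep PySem.Dict.empty

def pvUpdatesOf (sf : List (List (String × Option String))) :
    PySem.Dict Int (Option String × Option String) :=
  (pvGroupsOf sf).items.foldl pvUpdStep PySem.Dict.empty

def pvResultA (sf : List (List (String × Option String))) : List (List (String × Option String)) :=
  (PySem.List.enumerate sf).map (fun p =>
    match (pvUpdatesOf sf).get? p.1 with
    | some w => (((PySem.Dict.mk p.2).insert "amends_accession" w.1).insert "amends_filing_date" w.2).items
    | none => p.2)

theorem pvPortA_eq (filings : List (List (String × Option String))) :
    identify_amendment_relationships_py filings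
      = pvResultA (PySem.List.sorted filings (fun x => pvGetS x "filing_date")) := rfl

-- ===== grouping characterization =====

theorem pvGroups_getD (z : List (Int × List (String × Option String)))
    (g : PySem.Dict String (List (Int × List (String × Option String)))) (b : String) :
    (z.foldl pvGrpStep g).getD b []
      = g.getD b [] ++ z.filter (fun p => pvInG b p.2) := by
  induction z generalizing g with
  | nil => simp
  | cons p z ih =>
    rw [List.foldl_cons, ih, List.filter_cons]
    by_cases h1 : pvTyp p.2 = ""
    · have hstep : pvGrpStep g p = g := by
        rw [pvGrpStep]; rw [pvTyp_eq, if_pos h1]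
      have hin : pvInG b p.2 = false := by simp [pvInG, h1]
      rw [hstep, hin]
      simp
    · have hstep : pvGrpStep g p = g.modify (pvBase (pvTyp p.2)) [] (· ++ [p]) := by
        rw [pvGrpStep]; rw [pvTyp_eq, if_neg h1]
      rw [hstep, PySem.Dict.getD_modify]
      by_cases hb : b = pvBase (pvTyp p.2)
      · have hin : pvInG b p.2 = true := by simp [pvInG, h1, hb]
        rw [if_pos hb, hin, ← hb]
        simp
      · have hin : pvInG b p.2 = false := by
          simp only [pvInG, Bool.and_eq_false_iff]
          right; simpa [beq_iff_eq] using fun hh => hb hh.symm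
        rw [if_neg hb, hin]
        simp

theorem pvGroups_nodup_keys (sf : List (List (String × Option String))) :
    (pvGroupsOf sf).keys.Nodup := by
  rw [pvGroupsOf]
  generalize PySem.List.enumerate sf = z
  have h : ∀ (z : List (Int × List (String × Option String))) g,
      g.keys.Nodup → (z.foldl pvGrpStep g).keys.Nodup := by
    intro z
    induction z with
    | nil => intro g hg; exact hg
    | cons p z ih =>
      intro g hg
      rw [List.foldl_cons]
      apply ih
      rw [pvGrpStep]
      split
      · exact hg
      · exact PySem.Dict.nodup_keys_insert _ _ _ hg
  exact h z _ (by simp [PySem.Dict.keys_empty])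

-- index k of sf has base b in the groups dict whenever its group list is nonempty
theorem pvGroups_contains (sf : List (List (String × Option String))) (b : String)
    (h : (pvGroupsOf sf).getD b [] ≠ []) : b ∈ (pvGroupsOf sf).keys := by
  by_contra hc
  have hcont : (pvGroupsOf sf).contains b = false := by
    rw [PySem.Dict.contains_eq_decide_mem_keys]
    simpa using hc
  exact h (PySem.Dict.getD_of_not_contains (pvGroupsOf sf) [] hcont)

-- an element of a group list is the enumerate pair of its index
theorem pvMem_grp {sf : List (List (String × Option String))} {b : String}
    {q : Int × List (String × Option String)}
    (hq : q ∈ (pvGroupsOf sf).getD b []) :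
    ∃ j : Nat, ∃ hj : j < sf.length, q = ((j : Int), sf[j]) ∧ pvInG b sf[j] = true := by
  rw [pvGroupsOf, pvGroups_getD, PySem.Dict.getD_empty, List.nil_append] at hq
  obtain ⟨hmem, hpred⟩ := List.mem_filter.1 hq
  obtain ⟨j, hj, rfl⟩ := (PySem.List.mem_enumerate_iff _ _ _).1 hmem
  exact ⟨j, hj, by simp, by simpa using hpred⟩

theorem pvInnerStep_eq (originals : List (Int × List (String × Option String)))
    (u : PySem.Dict Int (Option String × Option String)) (q) :
    pvInnerStep originals u q
      = if pvGetS q.2 "filing_date" = "" then u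
        else u.insert q.1 (pvVal (pvGetS q.2 "filing_date") originals) := by
  simp only [pvInnerStep, pvVal]
  by_cases h : pvGetS q.2 "filing_date" = ""
  · rw [if_pos h, if_pos h]
  · rw [if_neg h, if_neg h]
    cases hX : (PySem.List.sorted (List.filter
        (fun o => decide (pvGetS o.2 "filing_date" < pvGetS q.2 "filing_date")) originals)
        (fun o => pvGetS o.2 "filing_date") true).head? <;> rfl

theorem pvInner_get (originals : List (Int × List (String × Option String))) :
    ∀ (ams : List (Int × List (String × Option String)))
      (u : PySem.Dict Int (Option String × Option String)) (i : Int),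
      ams.Pairwise (fun a b => a.1 ≠ b.1) →
      (ams.foldl (pvInnerStep originals) u).get? i
        = match ams.find? (fun q => q.1 == i) with
          | some q => if pvGetS q.2 "filing_date" = "" then u.get? i
                      else some (pvVal (pvGetS q.2 "filing_date") originals)
          | none => u.get? i := by
  intro ams
  induction ams with
  | nil => intro u i _; rfl
  | cons q t ih =>
    intro u i hnd
    rw [List.foldl_cons]
    by_cases hq : q.1 = i
    · rw [List.find?_cons_of_pos (by simpa using hq)]
      have hnone : t.find? (fun r => r.1 == i) = none := by
        rw [List.find?_eq_none]
        intro x hx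
        have := (List.pairwise_cons.1 hnd).1 x hx
        simp only [beq_iff_eq]
        exact fun hh => this (hq.trans hh.symm)
      rw [ih _ i (List.pairwise_cons.1 hnd).2, pvInnerStep_eq]
      simp only [hnone]
      by_cases hd : pvGetS q.2 "filing_date" = ""
      · rw [if_pos hd, if_pos hd]
      · rw [if_neg hd, if_neg hd, hq, PySem.Dict.get?_insert, if_pos rfl]
    · rw [List.find?_cons_of_neg (by simpa using hq), ih _ i (List.pairwise_cons.1 hnd).2, pvInnerStep_eq]
      have hu : (if pvGetS q.2 "filing_date" = "" then u
          else u.insert q.1 (pvVal (pvGetS q.2 "filing_date") originals)).get? i = u.get? i := by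
        split
        · rfl
        · rw [PySem.Dict.get?_insert, if_neg (fun hh => hq hh.symm)]
      rw [hu]

theorem pvFind_unique {α : Type} (p : α → Bool) (a : α) :
    ∀ (l : List α), a ∈ l → p a = true → (∀ x ∈ l, p x = true → x = a) →
    l.find? p = some a := by
  intro l
  induction l with
  | nil => intro h; cases h
  | cons x t ih =>
    intro hmem hpa huniq
    by_cases hx : p x = true
    · rw [List.find?_cons_of_pos hx, huniq x (by simp) hx]
    · rw [List.find?_cons_of_neg hx]
      have hxa : ¬ a = x := fun h => hx (by rw [← h]; exact hpa)
      exact ih ((List.mem_cons.1 hmem).resolve_left hxa)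
        hpa (fun y hy hpy => huniq y (List.mem_cons_of_mem _ hy) hpy)

-- the amendments of a group have pairwise distinct indices
theorem pvAms_pairwise (sf : List (List (String × Option String))) (b : String) :
    (((pvGroupsOf sf).getD b []).filter
        (fun q => PySem.Str.isIn "/" (pvGetS q.2 "filing_type"))).Pairwise
      (fun a b => a.1 ≠ b.1) := by
  rw [pvGroupsOf, pvGroups_getD, PySem.Dict.getD_empty, List.nil_append]
  exact (((PySem.List.pairwise_lt_enumerate sf 0).imp (fun h => ne_of_lt h)).filter _).filter _

-- one step of the per-group fold, seen from a fixed index k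
theorem pvUpdStep_get (sf : List (List (String × Option String))) (k : Nat) (hk : k < sf.length)
    (b : String) (u : PySem.Dict Int (Option String × Option String)) :
    (pvUpdStep u (b, (pvGroupsOf sf).getD b [])).get? (k : Int)
      = if b = pvBase (pvTyp sf[k]) ∧ pvTyp sf[k] ≠ "" ∧ pvAmd sf[k] = true ∧ pvDate sf[k] ≠ "" then
          some (pvVal (pvDate sf[k]) (((pvGroupsOf sf).getD b []).filter
            (fun q => !(PySem.Str.isIn "/" (pvGetS q.2 "filing_type")))))
        else u.get? (k : Int) := by
  simp only [pvUpdStep]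
  rw [pvInner_get _ _ u (k : Int) (pvAms_pairwise sf b)]
  have hchar : ∀ q ∈ ((pvGroupsOf sf).getD b []).filter
      (fun q => PySem.Str.isIn "/" (pvGetS q.2 "filing_type")),
      q.1 = (k : Int) → q = ((k : Int), sf[k]) ∧ pvInG b sf[k] = true ∧ pvAmd sf[k] = true := by
    intro q hq hq1
    obtain ⟨hmem, hpred⟩ := List.mem_filter.1 hq
    obtain ⟨j, hj, hqe, hin⟩ := pvMem_grp hmem
    have hjk : j = k := by
      have : (j : Int) = (k : Int) := by rw [hqe] at hq1; exact hq1
      exact_mod_cast this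
    subst hjk
    refine ⟨hqe, hin, ?_⟩
    rw [hqe] at hpred
    simpa [pvAmd_eq] using hpred
  by_cases hqb : b = pvBase (pvTyp sf[k]) ∧ pvTyp sf[k] ≠ "" ∧ pvAmd sf[k] = true
  · obtain ⟨hb, ht, ha⟩ := hqb
    have hmemk : ((k : Int), sf[k]) ∈ ((pvGroupsOf sf).getD b []).filter
        (fun q => PySem.Str.isIn "/" (pvGetS q.2 "filing_type")) := by
      apply List.mem_filter.2
      constructor
      · rw [pvGroupsOf, pvGroups_getD, PySem.Dict.getD_empty, List.nil_append]
        apply List.mem_filter.2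
        refine ⟨(PySem.List.mem_enumerate_iff _ _ _).2 ⟨k, hk, by simp⟩, ?_⟩
        simp [pvInG, ht, hb]
      · simpa [pvAmd_eq] using ha
    have hfind : (((pvGroupsOf sf).getD b []).filter
        (fun q => PySem.Str.isIn "/" (pvGetS q.2 "filing_type"))).find?
          (fun q => q.1 == (k : Int)) = some ((k : Int), sf[k]) := by
      apply pvFind_unique _ _ _ hmemk (by simp)
      intro x hx hpx
      exact (hchar x hx (by simpa using hpx)).1
    simp only [hfind]
    by_cases hd : pvDate sf[k] = ""
    · rw [if_pos (show pvGetS sf[k] "filing_date" = "" from hd), if_neg (fun hh => hh.2.2.2 hd)]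
    · rw [if_neg (show ¬ pvGetS sf[k] "filing_date" = "" from hd), if_pos ⟨hb, ht, ha, hd⟩,
        pvDate_eq sf[k]]
  · have hfind : (((pvGroupsOf sf).getD b []).filter
        (fun q => PySem.Str.isIn "/" (pvGetS q.2 "filing_type"))).find?
          (fun q => q.1 == (k : Int)) = none := by
      rw [List.find?_eq_none]
      intro x hx hpx
      obtain ⟨hqe, hin, ha⟩ := hchar x hx (by simpa using hpx)
      have hb : pvBase (pvTyp sf[k]) = b := by
        have := (Bool.and_eq_true_iff.1 hin).2
        simpa [beq_iff_eq] using this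
      have ht : pvTyp sf[k] ≠ "" := by
        have := (Bool.and_eq_true_iff.1 hin).1
        simpa using this
      exact hqb ⟨hb.symm, ht, ha⟩
    simp only [hfind]
    rw [if_neg (fun hh => hqb ⟨hh.1, hh.2.1, hh.2.2.1⟩)]

theorem pvUpdates_get (sf : List (List (String × Option String))) (k : Nat) (hk : k < sf.length) :
    (pvUpdatesOf sf).get? (k : Int)
      = if pvTyp sf[k] ≠ "" ∧ pvAmd sf[k] = true ∧ pvDate sf[k] ≠ "" then
          some (pvVal (pvDate sf[k]) (((pvGroupsOf sf).getD (pvBase (pvTyp sf[k])) []).filter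
            (fun q => !(PySem.Str.isIn "/" (pvGetS q.2 "filing_type")))))
        else none := by
  rw [pvUpdatesOf,
    PySem.Dict.items_eq_map_keys _ (pvGroups_nodup_keys sf) [], List.foldl_map]
  have hfold : ∀ (kl : List String) (u : PySem.Dict Int (Option String × Option String)),
      (kl.foldl (fun u b => pvUpdStep u (b, (pvGroupsOf sf).getD b [])) u).get? (k : Int)
        = if pvBase (pvTyp sf[k]) ∈ kl ∧ pvTyp sf[k] ≠ "" ∧ pvAmd sf[k] = true ∧ pvDate sf[k] ≠ "" then
            some (pvVal (pvDate sf[k]) (((pvGroupsOf sf).getD (pvBase (pvTyp sf[k])) []).filter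
              (fun q => !(PySem.Str.isIn "/" (pvGetS q.2 "filing_type")))))
          else u.get? (k : Int) := by
    intro kl
    induction kl with
    | nil =>
      intro u
      rw [List.foldl_nil, if_neg (fun hh => List.not_mem_nil hh.1)]
    | cons b t ih =>
      intro u
      rw [List.foldl_cons, ih, pvUpdStep_get sf k hk b u]
      by_cases hbt : pvBase (pvTyp sf[k]) ∈ t
      · by_cases hq : pvTyp sf[k] ≠ "" ∧ pvAmd sf[k] = true ∧ pvDate sf[k] ≠ ""
        · rw [if_pos ⟨hbt, hq⟩, if_pos ⟨List.mem_cons_of_mem _ hbt, hq⟩]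
        · rw [if_neg (fun hh => hq hh.2), if_neg (fun hh => hq ⟨hh.2.1, hh.2.2.1, hh.2.2.2⟩),
              if_neg (fun hh => hq hh.2)]
      · by_cases hb : b = pvBase (pvTyp sf[k])
        · by_cases hq : pvTyp sf[k] ≠ "" ∧ pvAmd sf[k] = true ∧ pvDate sf[k] ≠ ""
          · rw [if_neg (fun hh => hbt hh.1), if_pos ⟨hb, hq.1, hq.2.1, hq.2.2⟩,
                if_pos ⟨List.mem_cons.2 (Or.inl hb.symm), hq⟩, hb]
          · rw [if_neg (fun hh => hq hh.2), if_neg (fun hh => hq ⟨hh.2.1, hh.2.2.1, hh.2.2.2⟩),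
                if_neg (fun hh => hq hh.2)]
        · rw [if_neg (fun hh => hbt hh.1), if_neg (fun hh => hb hh.1),
              if_neg (fun hh => (List.mem_cons.1 hh.1).elim (fun h => hb h.symm) hbt)]
  rw [hfold]
  by_cases hq : pvTyp sf[k] ≠ "" ∧ pvAmd sf[k] = true ∧ pvDate sf[k] ≠ ""
  · have hmemk : pvBase (pvTyp sf[k]) ∈ (pvGroupsOf sf).keys := by
      apply pvGroups_contains
      intro hnil
      have hmem : ((k : Int), sf[k]) ∈ (pvGroupsOf sf).getD (pvBase (pvTyp sf[k])) [] := by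
        rw [pvGroupsOf, pvGroups_getD, PySem.Dict.getD_empty, List.nil_append]
        apply List.mem_filter.2
        refine ⟨(PySem.List.mem_enumerate_iff _ _ _).2 ⟨k, hk, by simp⟩, ?_⟩
        simp [pvInG, hq.1]
      rw [hnil] at hmem
      cases hmem
    rw [if_pos ⟨hmemk, hq⟩, if_pos hq]
  · rw [if_neg (fun hh => hq hh.2), if_neg hq, PySem.Dict.get?_empty]

-- first-max of pairs projects to first-max of the values
theorem pvFam_snd_aux (key : List (String × Option String) → String)
    (P : List (Int × List (String × Option String))) :
    ∀ (m : Option (Int × List (String × Option String))),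
      (P.foldl (pvG (fun p => key p.2)) m).map (·.2)
        = (P.map (·.2)).foldl (pvG key) (m.map (·.2)) := by
  induction P with
  | nil => intro m; rfl
  | cons p P ih =>
    intro m
    rw [List.foldl_cons, List.map_cons, List.foldl_cons, ih]
    congr 1
    cases m with
    | none => rfl
    | some y =>
      show (if key y.2 < key p.2 then some p else some y).map (·.2)
        = if key y.2 < key p.2 then some p.2 else some y.2
      split <;> rfl

theorem pvFam_snd (key : List (String × Option String) → String)
    (P : List (Int × List (String × Option String))) :
    (pvFam (fun p => key p.2) P).map (·.2) = pvFam key (P.map (·.2)) :=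
  pvFam_snd_aux key P none

-- filtering an enumeration by a property of the element and projecting drops the indices
theorem pvFilter_snd (c : List (String × Option String) → Bool)
    (l : List (List (String × Option String))) :
    ∀ (s : Int),
      ((PySem.List.enumerate l s).filter (fun p => c p.2)).map (·.2) = l.filter c := by
  induction l with
  | nil => intro s; rfl
  | cons x xs ih =>
    intro s
    rw [PySem.List.enumerate_cons, List.filter_cons, List.filter_cons]
    by_cases hc : c x
    · rw [if_pos (by simpa using hc), if_pos hc, List.map_cons, ih]
    · rw [if_neg (by simpa using hc), if_neg hc, ih]

-- A's per-amendment value equals the value B reads off its state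
theorem pvVal_eq_bm (sf pre suf : List (List (String × Option String)))
    (f : List (String × Option String))
    (hsf : sf = pre ++ f :: suf)
    (hs : sf.Pairwise (fun a b => pvDate a ≤ pvDate b))
    (ht : pvTyp f ≠ "") (ha : pvAmd f = true) (hd : pvDate f ≠ "") :
    pvVal (pvDate f) (((pvGroupsOf sf).getD (pvBase (pvTyp f)) []).filter
        (fun q => !(PySem.Str.isIn "/" (pvGetS q.2 "filing_type"))))
      = (match pvBM (pvSt (pvBase (pvTyp f)) pre) (pvDate f) with
         | some m => (pvGetV m "accession_number", pvGetV m "filing_date")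
         | none => (none, none)) := by
  have hsplit := List.pairwise_append.1 (hsf ▸ hs)
  have hpre : pre.Pairwise (fun a b => pvDate a ≤ pvDate b) := hsplit.1
  have hlef : ∀ o ∈ pre, pvDate o ≤ pvDate f :=
    fun o ho => hsplit.2.2 o ho f (List.mem_cons_self)
  have hsufge : ∀ o ∈ suf, pvDate f ≤ pvDate o :=
    (List.pairwise_cons.1 hsplit.2.1).1
  have hG : (pvGroupsOf sf).getD (pvBase (pvTyp f)) []
      = (PySem.List.enumerate sf).filter (fun p => pvInG (pvBase (pvTyp f)) p.2) := by
    rw [pvGroupsOf, pvGroups_getD, PySem.Dict.getD_empty, List.nil_append]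
  have hPF : (((pvGroupsOf sf).getD (pvBase (pvTyp f)) []).filter
        (fun q => !(PySem.Str.isIn "/" (pvGetS q.2 "filing_type")))).filter
        (fun o => pvGetS o.2 "filing_date" < pvDate f)
      = (PySem.List.enumerate sf).filter (fun p =>
          decide (pvGetS p.2 "filing_date" < pvDate f) &&
           (!(PySem.Str.isIn "/" (pvGetS p.2 "filing_type"))) && pvInG (pvBase (pvTyp f)) p.2) := by
    rw [hG, List.filter_filter, List.filter_filter]
  have hsnd : ((PySem.List.enumerate sf).filter (fun p =>
          decide (pvGetS p.2 "filing_date" < pvDate f) &&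
           (!(PySem.Str.isIn "/" (pvGetS p.2 "filing_type"))) && pvInG (pvBase (pvTyp f)) p.2)).map (·.2)
      = sf.filter (fun o =>
          decide (pvGetS o "filing_date" < pvDate f) &&
           (!(PySem.Str.isIn "/" (pvGetS o "filing_type"))) && pvInG (pvBase (pvTyp f)) o) :=
    pvFilter_snd (fun o =>
          decide (pvGetS o "filing_date" < pvDate f) &&
           (!(PySem.Str.isIn "/" (pvGetS o "filing_type"))) && pvInG (pvBase (pvTyp f)) o) sf 0
  have hcut : sf.filter (fun o =>
          decide (pvGetS o "filing_date" < pvDate f) &&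
           (!(PySem.Str.isIn "/" (pvGetS o "filing_type"))) && pvInG (pvBase (pvTyp f)) o)
      = (pvOrig (pvBase (pvTyp f)) pre).filter (fun o => pvDate o < pvDate f) := by
    rw [hsf, List.filter_append]
    have hfsuf : List.filter (fun o =>
          decide (pvGetS o "filing_date" < pvDate f) &&
           (!(PySem.Str.isIn "/" (pvGetS o "filing_type"))) && pvInG (pvBase (pvTyp f)) o) (f :: suf) = [] := by
      rw [List.filter_eq_nil_iff]
      intro x hx
      rcases List.mem_cons.1 hx with rfl | hxs
      · have hax : (!(PySem.Str.isIn "/" (pvGetS x "filing_type"))) = false := by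
          rw [show PySem.Str.isIn "/" (pvGetS x "filing_type") = true from ha]; rfl
        simp only [hax, Bool.and_false, Bool.false_and]
        exact Bool.false_ne_true
      · have hge : ¬ (pvGetS x "filing_date" < pvDate f) := not_lt.2 (hsufge x hxs)
        simp only [decide_eq_false hge, Bool.false_and]
        exact Bool.false_ne_true
    rw [hfsuf, List.append_nil, pvOrig, List.filter_filter]
    apply List.filter_congr
    intro x _
    show (decide (pvDate x < pvDate f) && (!pvAmd x) && pvInG (pvBase (pvTyp f)) x)
      = (decide (pvDate x < pvDate f) && (pvInG (pvBase (pvTyp f)) x && !pvAmd x))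
    cases pvAmd x <;> cases pvInG (pvBase (pvTyp f)) x <;> simp
  have hchain : ((pvFam (fun p => pvGetS p.2 "filing_date")
        ((((pvGroupsOf sf).getD (pvBase (pvTyp f)) []).filter
          (fun q => !(PySem.Str.isIn "/" (pvGetS q.2 "filing_type")))).filter
          (fun o => pvGetS o.2 "filing_date" < pvDate f))).map (·.2))
      = pvBM (pvSt (pvBase (pvTyp f)) pre) (pvDate f) := by
    rw [pvFam_snd (fun o => pvGetS o "filing_date"), hPF, hsnd, hcut]
    exact pvCrux (pvOrig (pvBase (pvTyp f)) pre) (pvDate f)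
      (List.Pairwise.filter _ hpre)
      (fun o ho => hlef o (List.mem_of_mem_filter ho))
  rw [pvVal, pvHead_sorted_rev, ← hchain]
  cases pvFam (fun p => pvGetS p.2 "filing_date")
      ((((pvGroupsOf sf).getD (pvBase (pvTyp f)) []).filter
        (fun q => !(PySem.Str.isIn "/" (pvGetS q.2 "filing_type")))).filter
        (fun o => pvGetS o.2 "filing_date" < pvDate f)) <;> rfl

-- assembly: A's result list is the specification list
theorem pvResultA_eq_specList (sf : List (List (String × Option String)))
    (hs : sf.Pairwise (fun a b => pvDate a ≤ pvDate b)) :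
    pvResultA sf = pvSpecList [] sf := by
  have main : ∀ (l pre : List (List (String × Option String))), sf = pre ++ l →
      (PySem.List.enumerate l (pre.length : Int)).map (fun p =>
        match (pvUpdatesOf sf).get? p.1 with
        | some w => (((PySem.Dict.mk p.2).insert "amends_accession" w.1).insert "amends_filing_date" w.2).items
        | none => p.2) = pvSpecList pre l := by
    intro l
    induction l with
    | nil => intro pre _; rfl
    | cons f r ih =>
      intro pre hsf
      rw [PySem.List.enumerate_cons, List.map_cons, pvSpecList]
      have hk : pre.length < sf.length := by
        rw [hsf, List.length_append]; simp
      have hf : sf[pre.length] = f := by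
        rw [List.getElem_of_eq hsf, List.getElem_append_right (le_refl _)]
        simp
      have hhead : (match (pvUpdatesOf sf).get? ((pre.length : Nat) : Int) with
          | some w => (((PySem.Dict.mk f).insert "amends_accession" w.1).insert "amends_filing_date" w.2).items
          | none => f) = pvApply f (pvAns pre f) := by
        rw [pvUpdates_get sf pre.length hk]
        simp only [hf]
        by_cases h1 : pvTyp f = ""
        · rw [if_neg (fun hh => hh.1 h1), pvAns, if_pos h1, pvApply]
        · by_cases h2 : pvAmd f = true
          · by_cases h3 : pvDate f = ""
            · rw [if_neg (fun hh => hh.2.2 h3), pvAns, if_neg h1, if_pos h2, if_pos h3, pvApply]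
            · rw [if_pos ⟨h1, h2, h3⟩, pvAns, if_neg h1, if_pos h2, if_neg h3, pvApply]
              have hval := pvVal_eq_bm sf pre r f hsf hs h1 h2 h3
              rw [hval]
          · rw [if_neg (fun hh => h2 hh.2.1), pvAns, if_neg h1, if_neg h2, pvApply]
      rw [show ((pre.length : Int) + 1) = (((pre ++ [f]).length : Nat) : Int) by
            simp, ih (pre ++ [f]) (by rw [hsf]; simp)]
      exact congrArg₂ _ hhead rfl
  have h0 := main sf [] rfl
  rw [pvResultA]
  exact h0

theorem pvFinal (filings : List (List (String × Option String))) :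
    identify_amendment_relationships_py filings = identify_amendment_relationships_py_alt filings := by
  rw [pvPortA_eq, pvAlt_eq_specList]
  exact pvResultA_eq_specList _ (PySem.List.sorted_pairwise filings _)

-- ===== VERDICT (by name: the statement is the Claim_ definition above) =====
theorem identify_amendment_relationships_py_spec : Claim_equal_identify_amendment_relationships_py := by
  intro filings _ _
  exact pvFinal filings
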